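-- pv_equiv track=rewrite | github.com/juliantang324/Algorithm | problems/remove2letters.py | solve
-- ===== SOURCE A (Python) =====
-- def solve(arr: str) -> int:
--     ans = left = 0
--     for right, x in enumerate(arr):
--         if right - left + 1 > 2:
--             if x != arr[left]:
--                 ans += 1
--             left += 1
--     return ans + 1
-- ===== SOURCE B (Python) =====
-- def solve(arr: str) -> int:
--     even, odd = arr[::2], arr[1::2]
--     return (1
--             + sum(a != b for a, b in zip(even, even[1:]))
--             + sum(a != b for a, b in zip(odd, odd[1:])))
-- ===== Notes on version B (the rewrite author's own statement) =====
-- stated objective: alternative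
-- what changed: Replaced A's single interleaved sliding-window pass (comparing arr[right] with arr[left]=arr[right-2] while maintaining two moving indices) by strided decomposition: slice the string into even and odd subsequences (arr[::2], arr[1::2]) and count adjacent differing characters within each, plus 1.
import Mathlib
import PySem

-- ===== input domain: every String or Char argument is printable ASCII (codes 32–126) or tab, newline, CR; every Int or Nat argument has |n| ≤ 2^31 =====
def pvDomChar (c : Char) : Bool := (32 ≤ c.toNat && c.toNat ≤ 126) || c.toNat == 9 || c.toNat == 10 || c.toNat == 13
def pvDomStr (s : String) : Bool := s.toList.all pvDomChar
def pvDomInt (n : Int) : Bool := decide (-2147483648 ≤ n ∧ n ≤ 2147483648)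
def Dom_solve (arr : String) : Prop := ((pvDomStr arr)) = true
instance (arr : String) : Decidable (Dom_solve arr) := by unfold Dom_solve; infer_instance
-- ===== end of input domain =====

-- B replaces A's interleaved sliding-window pass by two strided subsequences (arr[::2], arr[1::2])
-- with an adjacent-difference count in each; alternative decomposition, same O(n) cost.

-- ===== PORT A =====
-- the loop body of A: state (ans, left), element (right, x); arr[left] via pyGet?
def solveStep (l : List Char) (st : Int × Int) (p : Int × Char) : Int × Int :=
  if p.1 - st.2 + 1 > 2 then
    ((if some p.2 ≠ PySem.List.pyGet? l st.2 then st.1 + 1 else st.1), st.2 + 1)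
  else st

def solve (arr : String) : Int :=
  let l := arr.toList
  ((PySem.List.enumerate l 0).foldl (solveStep l) (0, 0)).1 + 1

-- ===== PORT B =====
-- sum(a != b for a, b in zip(s, s[1:]))
def diffsB (s : List Char) : Int :=
  (s.zip (PySem.List.slice s (some 1) none)).foldl
    (fun n p => n + (if p.1 ≠ p.2 then 1 else 0)) 0

def solve_alt (arr : String) : Int :=
  let even := (PySem.List.slice? arr.toList none none 2).getD []
  let odd := (PySem.List.slice? arr.toList (some 1) none 2).getD []
  1 + diffsB even + diffsB odd

-- ===== PRECONDITION & SPEC =====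
def Spec_solve (arr : String) (out : Int) : Prop := out = solve_alt arr
instance (arr : String) (out : Int) : Decidable (Spec_solve arr out) := by unfold Spec_solve; infer_instance

-- ===== CLAIM (what is proved, stated in full; the proofs are below) =====
def Claim_equal_solve : Prop := ∀ (arr : String), Dom_solve arr → Spec_solve arr (solve arr)

-- ===== LEMMAS AND PROOFS =====

-- the even-indexed subsequence; oddsL l = even-indexed subsequence of l.tail
def evensL : List Char → List Char
  | [] => []
  | [a] => [a]
  | a :: _ :: t => a :: evensL t

def oddsL : List Char → List Char
  | [] => []
  | _ :: t => evensL t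

-- recursive adjacent-difference count
def dd : List Char → Int
  | a :: b :: t => (if a ≠ b then 1 else 0) + dd (b :: t)
  | _ => 0

-- recursive distance-2 difference count (A's semantics)
def cnt2 : List Char → Int
  | a :: b :: c :: t => (if c ≠ a then 1 else 0) + cnt2 (b :: c :: t)
  | _ => 0

lemma evensL_cons (c : Char) (t : List Char) : evensL (c :: t) = c :: oddsL t := by
  cases t <;> simp [evensL, oddsL]

lemma diffsB_eq_dd (s : List Char) : diffsB s = dd s := by
  have key : ∀ (s : List Char) (n : Int),
      (s.zip s.tail).foldl (fun n p => n + (if p.1 ≠ p.2 then 1 else 0)) n = n + dd s := by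
    intro s
    induction s with
    | nil => intro n; simp [dd]
    | cons a t ih =>
      intro n
      cases t with
      | nil => simp [dd]
      | cons b t' =>
        simp only [List.tail_cons, List.zip_cons_cons, List.foldl_cons]
        rw [show (b :: t' : List Char).tail = t' from rfl] at ih
        rw [ih]
        simp [dd]; ring
  unfold diffsB
  rw [PySem.List.slice_from_one, key]
  simp

lemma cnt2_eq (l : List Char) : cnt2 l = dd (evensL l) + dd (oddsL l) := by
  induction l using cnt2.induct with
  | case1 a b c t ih =>
    rw [cnt2, ih]
    rw [show evensL (a :: b :: c :: t) = a :: evensL (c :: t) from rfl,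
        show oddsL (a :: b :: c :: t) = evensL (b :: c :: t) from rfl,
        show evensL (b :: c :: t) = b :: evensL t from rfl,
        show oddsL (b :: c :: t) = evensL (c :: t) from rfl,
        evensL_cons c t]
    rw [show dd (a :: c :: oddsL t) = (if a ≠ c then 1 else 0) + dd (c :: oddsL t) from rfl]
    have hac : (if c ≠ a then (1:Int) else 0) = (if a ≠ c then 1 else 0) := by
      by_cases h : a = c <;> simp [h, Ne, eq_comm]
    rw [hac]; ring
  | case2 l h =>
    -- l has fewer than 3 elements
    match l with
    | [] => simp [cnt2, evensL, oddsL, dd]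
    | [a] => simp [cnt2, evensL, oddsL, dd]
    | [a, b] => simp [cnt2, evensL, oddsL, dd]
    | a :: b :: c :: t => exact absurd rfl (h a b c t)

-- A-side: the fold computes cnt2 of the suffix starting two back
lemma foldA (L : List Char) : ∀ (r : List Char) (pre : List Char) (u v : Char) (ans : Int),
    L = pre ++ u :: v :: r →
    ((PySem.List.enumerate r ((pre.length : Int) + 2)).foldl (solveStep L) (ans, (pre.length : Int))).1
      = ans + cnt2 (u :: v :: r) := by
  intro r
  induction r with
  | nil => intro pre u v ans h; simp [PySem.List.enumerate, cnt2]
  | cons c r' ih =>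
    intro pre u v ans h
    rw [PySem.List.enumerate_cons, List.foldl_cons]
    have hstep : solveStep L (ans, (pre.length : Int)) ((pre.length : Int) + 2, c)
        = ((if c ≠ u then ans + 1 else ans), (pre.length : Int) + 1) := by
      unfold solveStep
      have hget : PySem.List.pyGet? L (pre.length : Int) = some u := by
        rw [h]; exact PySem.List.pyGet?_append_length pre (v :: c :: r') u
      simp only [hget]
      have hc : ((pre.length : Int) + 2) - (pre.length : Int) + 1 > 2 := by omega
      rw [if_pos hc]
      by_cases hcu : c = u <;> simp [hcu]
    rw [hstep]
    have h' : L = (pre ++ [u]) ++ v :: c :: r' := by simp [h]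
    have ih' := ih (pre ++ [u]) v c (if c ≠ u then ans + 1 else ans) h'
    have hlen : ((pre ++ [u]).length : Int) = (pre.length : Int) + 1 := by simp
    rw [hlen] at ih'
    have harg : (pre.length : Int) + 2 + 1 = (pre.length : Int) + 1 + 2 := by ring
    rw [harg, ih']
    rw [show cnt2 (u :: v :: c :: r') = (if c ≠ u then 1 else 0) + cnt2 (v :: c :: r') from rfl]
    rcases eq_or_ne c u with hcu | hcu
    · simp [hcu]
    · simp [hcu]; ring

lemma solve_eq_cnt2 (arr : String) : solve arr = cnt2 arr.toList + 1 := by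
  unfold solve
  match hl : arr.toList with
  | [] => simp [PySem.List.enumerate, cnt2]
  | [a] =>
    simp only [PySem.List.enumerate_cons, PySem.List.enumerate_nil, List.foldl_cons,
      List.foldl_nil]
    norm_num [solveStep, cnt2]
  | a :: b :: t =>
    simp only [PySem.List.enumerate_cons, List.foldl_cons]
    have h1 : solveStep (a :: b :: t) (0, 0) (0, a) = (0, 0) := by norm_num [solveStep]
    have h2 : solveStep (a :: b :: t) (0, 0) (0 + 1, b) = (0, 0) := by norm_num [solveStep]
    rw [h1, h2]
    have := foldA (a :: b :: t) t [] a b 0 rfl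
    simp only [List.length_nil, Nat.cast_zero, zero_add] at this
    norm_num at this ⊢
    rw [this]

-- B-side: characterize the strided slices
lemma filterMap_evens (l : List Char) :
    (List.range ((l.length + 1) / 2)).filterMap (fun k => l[2 * k]?) = evensL l := by
  induction l using evensL.induct with
  | case1 => simp [evensL]
  | case2 a => simp [evensL]
  | case3 a b t ih =>
    have hlen : ((a :: b :: t : List Char).length + 1) / 2 = (t.length + 1) / 2 + 1 := by
      simp; omega
    rw [hlen, List.range_succ_eq_map, List.filterMap_cons, List.filterMap_map]
    simp only [Nat.mul_zero, List.getElem?_cons_zero, evensL]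
    congr 1

lemma filterMap_odds (l : List Char) :
    (List.range (l.length / 2)).filterMap (fun k => l[2 * k + 1]?) = oddsL l := by
  cases l with
  | nil => simp [oddsL]
  | cons a t =>
    have hlen : (a :: t : List Char).length / 2 = (t.length + 1) / 2 := by
      simp
    rw [hlen]
    rw [show oddsL (a :: t) = evensL t from rfl, ← filterMap_evens t]
    apply List.filterMap_congr
    intro k _
    simp

lemma slice?_evens (l : List Char) :
    PySem.List.slice? l none none 2 = some (evensL l) := by
  unfold PySem.List.slice? PySem.List.sliceIndices
  norm_num
  rw [← filterMap_evens l]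
  have hC : (if 0 < l.length then (((l.length : Int) + 2 - 1) / 2).toNat else 0)
      = (l.length + 1) / 2 := by
    split <;> omega
  rw [hC]
  apply List.filterMap_congr
  intro k _
  have h2 : ((2 * (k : Int))).toNat = 2 * k := by omega
  rw [h2]

lemma slice?_odds (l : List Char) :
    PySem.List.slice? l (some 1) none 2 = some (oddsL l) := by
  unfold PySem.List.slice? PySem.List.sliceIndices
  norm_num
  cases l with
  | nil => simp [oddsL]
  | cons a t =>
    have hm : min (1 : Int) ((a :: t : List Char).length : Int) = 1 := by
      simp
    rw [hm]
    have hC : (if 1 < (a :: t : List Char).length then ((((a :: t : List Char).length : Int) - 1 + 2 - 1) / 2).toNat else 0)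
        = (a :: t : List Char).length / 2 := by
      split
      · simp_all; omega
      · simp_all
    rw [hC, ← filterMap_odds (a :: t)]
    apply List.filterMap_congr
    intro k _
    have h2 : ((1 : Int) + 2 * (k : Int)).toNat = 2 * k + 1 := by omega
    rw [h2]

-- ===== VERDICT (by name: the statement is the Claim_ definition above) =====
theorem solve_spec : Claim_equal_solve := by
  intro arr _
  unfold Spec_solve solve_alt
  rw [slice?_evens, slice?_odds]
  simp only [Option.getD_some]
  rw [diffsB_eq_dd, diffsB_eq_dd, solve_eq_cnt2, cnt2_eq]
  ring
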